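-- pv_equiv track=rewrite | github.com/paulrobello/bootstrap_project | src/bootstrap_project/__main__.py | resolve_feature_dependencies
-- ===== SOURCE A (Python) =====
-- from enum import StrEnum
--
-- class FeatureNames(StrEnum):
--     """Enum for feature names."""
--
--     BASE = "base"
--     CLI = "cli"
--     TEXTUAL = "textual"
--     PARAI = "par-ai-core"
--
-- feature_deps: dict[FeatureNames, list[FeatureNames]] = {
--     FeatureNames.CLI: [FeatureNames.BASE],
--     FeatureNames.TEXTUAL: [FeatureNames.BASE, FeatureNames.CLI],
--     FeatureNames.PARAI: [FeatureNames.BASE],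
-- }
--
-- def resolve_feature_dependencies(requested_features: list[FeatureNames] | None) -> set[FeatureNames]:
--     """Resolve feature dependencies and ensure BASE is always included."""
--     resolved = {FeatureNames.BASE}  # Always include BASE
--
--     if requested_features is None:
--         return resolved
--
--     # Add all requested features
--     resolved.update(requested_features)
--
--     # Recursively add dependencies
--     to_process = list(requested_features)
--     while to_process:
--         feature = to_process.pop(0)
--         if feature in feature_deps:
--             for dep in feature_deps[feature]:
--                 if dep not in resolved:
--                     resolved.add(dep)
--                     to_process.append(dep)
--
--     return resolved
-- ===== SOURCE B (Python) =====
-- BASE = "base"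
--
-- _DEPS = {
--     "cli": ["base"],
--     "textual": ["base", "cli"],
--     "par-ai-core": ["base"],
-- }
--
--
-- def _close_over(feature, resolved):
--     """Depth-first: add every not-yet-resolved dependency of feature, recursively."""
--     for dep in _DEPS.get(feature, []):
--         if dep not in resolved:
--             resolved.add(dep)
--             _close_over(dep, resolved)
--
--
-- def resolve_feature_dependencies(requested_features):
--     """Resolve feature dependencies and ensure BASE is always included."""
--     resolved = {BASE}
--     if requested_features is None:
--         return resolved
--     resolved.update(requested_features)
--     for feature in requested_features:
--         _close_over(feature, resolved)
--     return resolved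
-- ===== Notes on version B (the rewrite author's own statement) =====
-- stated objective: alternative
-- what changed: Replaces A's explicit work-queue BFS (a mutable to_process list popped from the front, with discovered dependencies appended) by a recursive depth-first closure helper that descends into each not-yet-resolved dependency immediately; no queue is maintained and the input list is not consumed.
import Mathlib
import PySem

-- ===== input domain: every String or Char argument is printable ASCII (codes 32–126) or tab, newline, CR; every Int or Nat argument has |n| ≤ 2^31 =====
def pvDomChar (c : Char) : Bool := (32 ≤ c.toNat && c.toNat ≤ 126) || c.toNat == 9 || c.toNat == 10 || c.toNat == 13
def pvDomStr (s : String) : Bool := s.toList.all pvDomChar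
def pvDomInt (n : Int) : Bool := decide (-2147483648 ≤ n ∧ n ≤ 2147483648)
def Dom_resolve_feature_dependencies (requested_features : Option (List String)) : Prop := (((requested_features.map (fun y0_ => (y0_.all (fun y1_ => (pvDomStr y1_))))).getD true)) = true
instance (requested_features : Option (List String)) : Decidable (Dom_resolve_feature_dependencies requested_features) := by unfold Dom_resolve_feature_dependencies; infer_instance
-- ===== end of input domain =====

-- B replaces A's explicit work-queue BFS by a recursive depth-first closure helper (alternative decomposition, same cost).


-- ===== PORT A =====
-- module-level dict feature_deps (shared by both Pythons)
def pvFeatureDeps : PySem.Dict String (List String) :=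
  ((PySem.Dict.empty.insert "cli" ["base"]).insert "textual" ["base", "cli"]).insert "par-ai-core" ["base"]

-- the 'while to_process:' loop; fuel is only a totality guard (queue length + 2 is proved sufficient below)
def pvALoop : Nat → PySem.Set String → List String → PySem.Set String
  | 0, resolved, _ => resolved
  | _ + 1, resolved, [] => resolved
  | fuel + 1, resolved, feature :: rest =>
    match pvFeatureDeps.get? feature with
    | none => pvALoop fuel resolved rest
    | some deps =>
      let st := deps.foldl
        (fun (st : PySem.Set String × List String) dep =>
          if st.1.contains dep then st else (PySem.Set.add st.1 dep, st.2 ++ [dep]))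
        (resolved, ([] : List String))
      pvALoop fuel st.1 (rest ++ st.2)

def resolve_feature_dependencies (requested_features : Option (List String)) : List String :=
  match requested_features with
  | none => PySem.Set.ofList ["base"]
  | some fs =>
    let resolved := PySem.Set.update (PySem.Set.ofList ["base"]) fs
    pvALoop (fs.length + 2) resolved fs

-- ===== PORT B =====
-- recursive DFS helper _close_over; fuel is only a totality guard (recursion depth over this dict is < 4)
def pvBClose : Nat → String → PySem.Set String → PySem.Set String
  | 0, _, resolved => resolved
  | fuel + 1, feature, resolved =>
    (pvFeatureDeps.getD feature []).foldl
      (fun r dep => if r.contains dep then r else pvBClose fuel dep (PySem.Set.add r dep))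
      resolved

def resolve_feature_dependencies_alt (requested_features : Option (List String)) : List String :=
  match requested_features with
  | none => PySem.Set.ofList ["base"]
  | some fs =>
    let resolved := PySem.Set.update (PySem.Set.ofList ["base"]) fs
    fs.foldl (fun r feature => pvBClose 4 feature r) resolved

-- ===== PRECONDITION & SPEC =====
def Spec_resolve_feature_dependencies (requested_features : Option (List String)) (out : List String) : Prop := out = resolve_feature_dependencies_alt requested_features
instance (requested_features : Option (List String)) (out : List String) : Decidable (Spec_resolve_feature_dependencies requested_features out) := by unfold Spec_resolve_feature_dependencies; infer_instance

-- ===== CLAIM (what is proved, stated in full; the proofs are below) =====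
def Claim_equal_resolve_feature_dependencies : Prop := ∀ (requested_features : Option (List String)), Dom_resolve_feature_dependencies requested_features → Spec_resolve_feature_dependencies requested_features (resolve_feature_dependencies requested_features)

-- ===== LEMMAS AND PROOFS =====

lemma pvDeps_get? (f : String) :
    pvFeatureDeps.get? f =
      if f = "par-ai-core" then some ["base"]
      else if f = "textual" then some ["base", "cli"]
      else if f = "cli" then some ["base"]
      else none := by
  simp [pvFeatureDeps, PySem.Dict.get?_insert, PySem.Dict.get?_empty]

lemma pvDeps_getD (f : String) :
    pvFeatureDeps.getD f [] =
      if f = "par-ai-core" then ["base"]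
      else if f = "textual" then ["base", "cli"]
      else if f = "cli" then ["base"]
      else [] := by
  simp [PySem.Dict.getD_eq_get?_getD, pvDeps_get?]
  split_ifs <;> rfl

-- the common closed form: starting from R ∋ "base", processing queue q adds exactly "cli",
-- and only when some queued feature is "textual" and "cli" is not yet resolved
lemma pvBClose_succ (fuel : Nat) (f : String) (R : PySem.Set String) :
    pvBClose (fuel + 1) f R =
      (pvFeatureDeps.getD f []).foldl
        (fun r dep => if r.contains dep then r else pvBClose fuel dep (PySem.Set.add r dep))
        R := rfl

lemma pvALoop_succ_cons (fuel : Nat) (R : PySem.Set String) (f : String) (rest : List String) :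
    pvALoop (fuel + 1) R (f :: rest) =
      match pvFeatureDeps.get? f with
      | none => pvALoop fuel R rest
      | some deps =>
        let st := deps.foldl
          (fun (st : PySem.Set String × List String) dep =>
            if st.1.contains dep then st else (PySem.Set.add st.1 dep, st.2 ++ [dep]))
          (R, ([] : List String))
        pvALoop fuel st.1 (rest ++ st.2) := rfl

lemma pvBClose_cli (R : PySem.Set String) (hb : "base" ∈ R) :
    pvBClose 3 "cli" (PySem.Set.add R "cli") = PySem.Set.add R "cli" := by
  rw [show (3 : Nat) = 2 + 1 from rfl, pvBClose_succ, pvDeps_getD]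
  rw [if_neg (by decide), if_neg (by decide), if_pos rfl]
  simp [List.foldl, PySem.Set.mem_add, hb]

lemma pvBClose_eval (f : String) (R : PySem.Set String) (hb : "base" ∈ R) :
    pvBClose 4 f R = if f = "textual" ∧ "cli" ∉ R then PySem.Set.add R "cli" else R := by
  rw [show (4 : Nat) = 3 + 1 from rfl, pvBClose_succ, pvDeps_getD]
  by_cases h1 : f = "par-ai-core"
  · subst h1
    rw [if_pos rfl, if_neg (fun hx => absurd hx.1 (by decide))]
    simp [List.foldl, hb]
  rw [if_neg h1]
  by_cases h2 : f = "textual"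
  · subst h2
    rw [if_pos rfl]
    by_cases hc : "cli" ∈ R
    · rw [if_neg (fun hx => hx.2 hc)]
      simp [List.foldl, hb, hc]
    · rw [if_pos ⟨rfl, hc⟩]
      simp only [List.foldl]
      rw [if_pos ((PySem.Set.contains_iff _ _).mpr hb),
        if_neg (fun h => hc ((PySem.Set.contains_iff _ _).mp h)),
        pvBClose_cli R hb]
  rw [if_neg h2]
  by_cases h3 : f = "cli"
  · subst h3
    rw [if_pos rfl, if_neg (fun hx => absurd hx.1 (by decide))]
    simp [List.foldl, hb]
  rw [if_neg h3, if_neg (fun hx => h2 hx.1)]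
  simp [List.foldl]

lemma pvB_fold (q : List String) (R : PySem.Set String) (hb : "base" ∈ R) :
    q.foldl (fun r feature => pvBClose 4 feature r) R =
      if "textual" ∈ q ∧ "cli" ∉ R then PySem.Set.add R "cli" else R := by
  induction q generalizing R with
  | nil => simp
  | cons f rest ih =>
    rw [List.foldl_cons, pvBClose_eval f R hb]
    by_cases h : f = "textual" ∧ "cli" ∉ R
    · rw [if_pos h]
      have hb2 : "base" ∈ PySem.Set.add R "cli" := (PySem.Set.mem_add _ _ _).mpr (Or.inl hb)
      rw [ih _ hb2, if_neg (by simp [PySem.Set.mem_add]),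
        if_pos ⟨by simp [h.1], h.2⟩]
    · rw [if_neg h, ih _ hb]
      by_cases hc : "cli" ∈ R
      · rw [if_neg (by simp [hc]), if_neg (by simp [hc])]
      · have hft : f ≠ "textual" := fun hx => h ⟨hx, hc⟩
        by_cases ht : "textual" ∈ rest
        · rw [if_pos ⟨ht, hc⟩, if_pos ⟨by simp [ht], hc⟩]
        · rw [if_neg (by simp [ht]), if_neg (by
            simp only [List.mem_cons, not_and, not_not]
            rintro (hx | hx)
            · exact absurd hx.symm hft
            · exact absurd hx ht)]

lemma pvA_loop (fuel : Nat) (q : List String) (R : PySem.Set String) (hb : "base" ∈ R)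
    (hf : q.length + (if "cli" ∈ R then 0 else 2) ≤ fuel) :
    pvALoop fuel R q =
      if "textual" ∈ q ∧ "cli" ∉ R then PySem.Set.add R "cli" else R := by
  induction fuel generalizing q R with
  | zero =>
    have hq : q = [] := by
      cases q with
      | nil => rfl
      | cons a t => exfalso; simp only [List.length_cons] at hf; split_ifs at hf <;> omega
    subst hq; simp [pvALoop]
  | succ fuel ih =>
    have hb' : PySem.Set.contains R "base" = true := (PySem.Set.contains_iff _ _).mpr hb
    cases q with
    | nil => simp [pvALoop]
    | cons f rest =>
      rw [pvALoop_succ_cons, pvDeps_get?]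
      by_cases h1 : f = "par-ai-core"
      · subst h1
        rw [if_pos rfl]
        simp only [List.foldl, hb', if_true, List.append_nil]
        rw [ih rest R hb (by simp only [List.length_cons] at hf; split_ifs at hf ⊢ <;> omega)]
        by_cases hc : "cli" ∈ R
        · rw [if_neg (by simp [hc]), if_neg (by simp [hc])]
        · by_cases ht : "textual" ∈ rest
          · rw [if_pos ⟨ht, hc⟩, if_pos ⟨by simp [ht], hc⟩]
          · rw [if_neg (by simp [ht]), if_neg (by
              simp only [List.mem_cons, not_and, not_not]
              rintro (hx | hx)
              · exact absurd hx (by simp)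
              · exact absurd hx ht)]
      rw [if_neg h1]
      by_cases h2 : f = "textual"
      · subst h2
        rw [if_pos rfl]
        by_cases hc : "cli" ∈ R
        · have hc' : PySem.Set.contains R "cli" = true := (PySem.Set.contains_iff _ _).mpr hc
          simp only [List.foldl, hb', hc', if_true, List.append_nil]
          rw [ih rest R hb (by simp only [List.length_cons] at hf; split_ifs at hf ⊢ <;> omega)]
          rw [if_neg (by simp [hc]), if_neg (by simp [hc])]
        · have hc' : PySem.Set.contains R "cli" = false :=
            Bool.eq_false_iff.mpr (fun h => hc ((PySem.Set.contains_iff _ _).mp h))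
          have hb2 : "base" ∈ PySem.Set.add R "cli" := (PySem.Set.mem_add _ _ _).mpr (Or.inl hb)
          have hc2 : "cli" ∈ PySem.Set.add R "cli" := (PySem.Set.mem_add _ _ _).mpr (Or.inr rfl)
          simp only [List.foldl, hb', hc', if_true, Bool.false_eq_true, if_false,
            List.nil_append]
          rw [ih (rest ++ ["cli"]) (PySem.Set.add R "cli") hb2 (by
            rw [if_pos hc2]; rw [if_neg hc] at hf
            simp only [List.length_cons] at hf
            simp only [List.length_append, List.length_cons, List.length_nil]
            omega)]
          rw [if_neg (by simp [hc2]), if_pos ⟨by simp, hc⟩]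
      rw [if_neg h2]
      by_cases h3 : f = "cli"
      · subst h3
        rw [if_pos rfl]
        simp only [List.foldl, hb', if_true, List.append_nil]
        rw [ih rest R hb (by simp only [List.length_cons] at hf; split_ifs at hf ⊢ <;> omega)]
        by_cases hc : "cli" ∈ R
        · rw [if_neg (by simp [hc]), if_neg (by simp [hc])]
        · by_cases ht : "textual" ∈ rest
          · rw [if_pos ⟨ht, hc⟩, if_pos ⟨by simp [ht], hc⟩]
          · rw [if_neg (by simp [ht]), if_neg (by
              simp only [List.mem_cons, not_and, not_not]
              rintro (hx | hx)
              · exact absurd hx.symm h2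
              · exact absurd hx ht)]
      rw [if_neg h3]
      rw [ih rest R hb (by simp only [List.length_cons] at hf; split_ifs at hf ⊢ <;> omega)]
      by_cases hc : "cli" ∈ R
      · rw [if_neg (by simp [hc]), if_neg (by simp [hc])]
      · by_cases ht : "textual" ∈ rest
        · rw [if_pos ⟨ht, hc⟩, if_pos ⟨by simp [ht], hc⟩]
        · rw [if_neg (by simp [ht]), if_neg (by
            simp only [List.mem_cons, not_and, not_not]
            rintro (hx | hx)
            · exact absurd hx.symm h2
            · exact absurd hx ht)]

-- ===== VERDICT (by name: the statement is the Claim_ definition above) =====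
theorem resolve_feature_dependencies_spec : Claim_equal_resolve_feature_dependencies := by
  intro rf _
  unfold Spec_resolve_feature_dependencies
  cases rf with
  | none => rfl
  | some fs =>
    have hb : "base" ∈ PySem.Set.update (PySem.Set.ofList ["base"]) fs := by
      rw [PySem.Set.mem_update]; left; simp [PySem.Set.mem_ofList]
    show pvALoop (fs.length + 2) (PySem.Set.update (PySem.Set.ofList ["base"]) fs) fs
        = fs.foldl (fun r feature => pvBClose 4 feature r) (PySem.Set.update (PySem.Set.ofList ["base"]) fs)
    rw [pvA_loop _ _ _ hb (by split_ifs <;> omega), pvB_fold _ _ hb]
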